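-- pv_equiv track=rewrite | github.com/fANLO77/Informatics | laba7/6.py | rasshifrovka
-- ===== SOURCE A (Python) =====
-- def rasshifrovka(shifr):
--     if "#" not in shifr:
--         return "Ошибка! Отсутствует символ #"
--     shifr = shifr[:-1]
--     shifr_list = [""] * len(shifr)
--     left = 0
--     right = len(shifr) - 1
--     for i in range(len(shifr)):
--         if i%2==0:
--             shifr_list[left] = shifr[i]
--             left+=1
--         else:
--             shifr_list[right] = shifr[i]
--             right-=1
--     return "".join(shifr_list)
-- ===== SOURCE B (Python) =====
-- def rasshifrovka(shifr):
--     if "#" not in shifr: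
--         return "Ошибка! Отсутствует символ #"
--     shifr = shifr[:-1]
--     return shifr[0::2] + shifr[1::2][::-1]
-- ===== Notes on version B (the rewrite author's own statement) =====
-- stated objective: simpler
-- what changed: Replaces the prefilled list and the two left/right pointers with a closed-form slice expression: even-index characters in order plus odd-index characters reversed.
import Mathlib
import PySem

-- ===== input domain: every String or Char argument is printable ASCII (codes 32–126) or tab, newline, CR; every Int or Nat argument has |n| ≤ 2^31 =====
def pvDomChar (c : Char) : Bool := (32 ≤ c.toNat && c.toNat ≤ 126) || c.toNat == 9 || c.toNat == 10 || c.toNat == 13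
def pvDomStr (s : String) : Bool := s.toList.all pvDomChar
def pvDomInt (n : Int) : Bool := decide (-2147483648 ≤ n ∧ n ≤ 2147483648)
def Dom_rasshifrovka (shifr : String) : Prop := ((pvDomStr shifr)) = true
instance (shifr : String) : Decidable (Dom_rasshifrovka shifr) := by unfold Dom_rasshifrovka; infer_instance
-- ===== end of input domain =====

-- B replaces A's prefilled list and two left/right pointers by the closed-form
-- slice expression shifr[0::2] + shifr[1::2][::-1] (objective: simpler).

-- ===== PORT A =====
-- one loop iteration of A: places shifr[i] at the left or right pointer
-- (the pointer indices are always ≥ 0 and < len here, so .toNat is exact)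
def rasshifrovkaStep (chars : List Char) (st : List String × Int × Int) (i : Int) :
    List String × Int × Int :=
  if i % 2 == 0 then
    (st.1.set st.2.1.toNat (String.ofList [PySem.List.pyGetD chars i ' ']), st.2.1 + 1, st.2.2)
  else
    (st.1.set st.2.2.toNat (String.ofList [PySem.List.pyGetD chars i ' ']), st.2.1, st.2.2 - 1)

def rasshifrovka (shifr : String) : String :=
  if !(shifr.toList.contains '#') then "Ошибка! Отсутствует символ #"
  else
    let s := PySem.Str.slice shifr none (some (-1))      -- shifr = shifr[:-1]
    let chars := s.toList
    let init : List String := List.replicate chars.length ""   -- [""] * len(shifr)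
    let st := (PySem.List.pyRange 0 (PySem.Str.len s) 1).foldl
      (rasshifrovkaStep chars) (init, 0, (chars.length : Int) - 1)
    PySem.Str.join "" st.1

-- ===== PORT B =====
-- step 2 of a slice is never 0, so slice? is always `some`; getD is unreachable
def rasshifrovka_alt (shifr : String) : String :=
  if !(shifr.toList.contains '#') then "Ошибка! Отсутствует символ #"
  else
    let s := PySem.Str.slice shifr none (some (-1))      -- shifr = shifr[:-1]
    (PySem.Str.slice? s (some 0) none 2).getD "" ++
      (PySem.Str.slice? ((PySem.Str.slice? s (some 1) none 2).getD "") none none (-1)).getD ""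

-- ===== PRECONDITION & SPEC =====
def Spec_rasshifrovka (shifr : String) (out : String) : Prop := out = rasshifrovka_alt shifr
instance (shifr : String) (out : String) : Decidable (Spec_rasshifrovka shifr out) := by unfold Spec_rasshifrovka; infer_instance

-- ===== CLAIM (what is proved, stated in full; the proofs are below) =====
def Claim_equal_rasshifrovka : Prop := ∀ (shifr : String), Dom_rasshifrovka shifr → Spec_rasshifrovka shifr (rasshifrovka shifr)

-- ===== LEMMAS AND PROOFS =====

-- chars at even (b = true) / odd (b = false) positions of a list
def pvAlt (b : Bool) : List Char → List Char
  | [] => []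
  | c :: t => if b then c :: pvAlt false t else pvAlt true t

def pvOne (c : Char) : String := String.ofList [c]

-- A's loop body, with the character passed alongside the index
def pvStep (st : List String × Int × Int) (p : Int × Char) : List String × Int × Int :=
  if p.1 % 2 == 0 then
    (st.1.set st.2.1.toNat (pvOne p.2), st.2.1 + 1, st.2.2)
  else
    (st.1.set st.2.2.toNat (pvOne p.2), st.2.1, st.2.2 - 1)

-- the filterMap forms produced by slice? with step 2 are exactly pvAlt
lemma pvFilterMap_both (s : List Char) :
    List.filterMap (fun k => s[2 * k]?) (List.range ((s.length + 1) / 2)) = pvAlt true s ∧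
    List.filterMap (fun k => s[2 * k + 1]?) (List.range (s.length / 2)) = pvAlt false s := by
  induction s with
  | nil => simp [pvAlt]
  | cons c t ih =>
    refine ⟨?_, ?_⟩
    · have hcnt : ((c :: t).length + 1) / 2 = t.length / 2 + 1 := by
        simp only [List.length_cons]; omega
      rw [hcnt, List.range_succ_eq_map, List.filterMap_cons, List.filterMap_map]
      have hfm : List.filterMap ((fun k => (c :: t)[2 * k]?) ∘ Nat.succ) (List.range (t.length / 2))
          = List.filterMap (fun k => t[2 * k + 1]?) (List.range (t.length / 2)) := by
        apply List.filterMap_congr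
        intro x _
        have h2 : 2 * Nat.succ x = (2 * x + 1) + 1 := by omega
        simp only [Function.comp_apply, h2]
        simp
      rw [hfm, ih.2]
      simp [pvAlt]
    · have hcnt : (c :: t).length / 2 = (t.length + 1) / 2 := by
        simp
      rw [hcnt]
      have hfm : List.filterMap (fun k => (c :: t)[2 * k + 1]?) (List.range ((t.length + 1) / 2))
          = List.filterMap (fun k => t[2 * k]?) (List.range ((t.length + 1) / 2)) := by
        apply List.filterMap_congr
        intro x _
        simp
      rw [hfm, ih.1]
      simp [pvAlt]

lemma pvSlice_even (s : List Char) :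
    PySem.List.slice? s (some 0) none 2 = some (pvAlt true s) := by
  rw [show pvAlt true s
      = List.filterMap (fun k => s[2 * k]?) (List.range ((s.length + 1) / 2)) from
      (pvFilterMap_both s).1.symm]
  simp only [PySem.List.slice?, PySem.List.sliceIndices]
  norm_num
  have hcnt : (if 0 < s.length then (((s.length : Int) + 2 - 1) / 2).toNat else 0)
      = (s.length + 1) / 2 := by
    split_ifs with h <;> omega
  rw [hcnt]
  refine List.filterMap_congr ?_
  intro x _
  have hx : ((2 : Int) * (x : Int)).toNat = 2 * x := by omega
  rw [hx]

lemma pvSlice_odd (s : List Char) :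
    PySem.List.slice? s (some 1) none 2 = some (pvAlt false s) := by
  rw [show pvAlt false s
      = List.filterMap (fun k => s[2 * k + 1]?) (List.range (s.length / 2)) from
      (pvFilterMap_both s).2.symm]
  simp only [PySem.List.slice?, PySem.List.sliceIndices]
  norm_num
  rcases s with _ | ⟨c, t⟩
  · simp
  · have hmin : min (1 : Int) (((c :: t).length : Int)) = 1 := by
      simp only [List.length_cons]; omega
    rw [hmin]
    have hcnt : (if 1 < (c :: t).length then ((((c :: t).length : Int) - 1 + 2 - 1) / 2).toNat else 0)
        = (c :: t).length / 2 := by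
      split_ifs with h <;> simp only [List.length_cons] at * <;> omega
    rw [hcnt]
    refine List.filterMap_congr ?_
    intro x _
    have hx : ((1 : Int) + 2 * (x : Int)).toNat = 2 * x + 1 := by omega
    rw [hx]

-- the two-pointer fill: state after folding pvStep over `enumerate s i` on a
-- buffer pre ++ (s.length empty slots) ++ suf
lemma pvFill (s : List Char) : ∀ (i : Int) (pre suf : List String), 0 ≤ i →
    (PySem.List.enumerate s i).foldl pvStep
      (pre ++ List.replicate s.length "" ++ suf, (pre.length : Int),
        (pre.length : Int) + s.length - 1)
    = (pre ++ (if i % 2 = 0 then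
          (pvAlt true s).map pvOne ++ ((pvAlt false s).map pvOne).reverse
        else
          (pvAlt false s).map pvOne ++ ((pvAlt true s).map pvOne).reverse) ++ suf,
        (pre.length : Int) + (if i % 2 = 0 then (pvAlt true s).length else (pvAlt false s).length),
        (pre.length : Int) + (if i % 2 = 0 then (pvAlt true s).length else (pvAlt false s).length) - 1) := by
  induction s with
  | nil =>
    intro i pre suf _
    simp [PySem.List.enumerate, pvAlt]
  | cons c t ih =>
    intro i pre suf hi
    rw [PySem.List.enumerate_cons]
    by_cases hpar : i % 2 = 0
    · -- c goes to the front at index pre.length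
      have hstep : pvStep (pre ++ List.replicate (c :: t).length "" ++ suf, (pre.length : Int),
            (pre.length : Int) + (c :: t).length - 1) (i, c)
          = ((pre ++ [pvOne c]) ++ List.replicate t.length "" ++ suf,
             ((pre ++ [pvOne c]).length : Int),
             ((pre ++ [pvOne c]).length : Int) + t.length - 1) := by
        simp only [pvStep, hpar]
        have htn : ((pre.length : Int)).toNat = pre.length := by omega
        simp only [List.length_cons, beq_self_eq_true, if_pos, htn]
        rw [List.replicate_succ]
        rw [show pre ++ ("" :: List.replicate t.length "") ++ suf
            = pre ++ ("" :: (List.replicate t.length "" ++ suf)) from by simp]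
        rw [List.set_append_right _ _ (Nat.le_refl _)]
        refine Prod.ext ?_ (Prod.ext ?_ ?_) <;> simp <;> push_cast <;> omega
      rw [List.foldl_cons, hstep, ih (i + 1) (pre ++ [pvOne c]) suf (by omega)]
      have hpar1 : ¬ (i + 1) % 2 = 0 := by omega
      have he : pvAlt true (c :: t) = c :: pvAlt false t := by simp [pvAlt]
      have ho : pvAlt false (c :: t) = pvAlt true t := by simp [pvAlt]
      simp only [if_neg hpar1, if_pos hpar, he, ho]
      refine Prod.ext ?_ (Prod.ext ?_ ?_) <;> simp [pvOne] <;> push_cast <;> omega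
    · -- c goes to the back at index pre.length + t.length
      have hstep : pvStep (pre ++ List.replicate (c :: t).length "" ++ suf, (pre.length : Int),
            (pre.length : Int) + (c :: t).length - 1) (i, c)
          = (pre ++ List.replicate t.length "" ++ (pvOne c :: suf),
             (pre.length : Int),
             (pre.length : Int) + t.length - 1) := by
        simp only [pvStep]
        have : ¬ (i % 2 == 0) = true := by
          simp; omega
        rw [if_neg this]
        have htn : ((pre.length : Int) + (c :: t).length - 1).toNat = pre.length + t.length := by
          simp; omega
        rw [htn]
        rw [show List.replicate (c :: t).length ("" : String)
            = List.replicate t.length "" ++ [""] from by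
          simp [List.replicate_succ']
        ]
        rw [show pre ++ (List.replicate t.length "" ++ [""]) ++ suf
            = (pre ++ List.replicate t.length "") ++ ("" :: suf) from by simp]
        rw [show pre.length + t.length = (pre ++ List.replicate t.length ("" : String)).length from by simp]
        rw [List.set_append_right _ _ (Nat.le_refl _)]
        refine Prod.ext ?_ (Prod.ext ?_ ?_) <;> simp <;> push_cast <;> omega
      rw [List.foldl_cons, hstep, ih (i + 1) pre (pvOne c :: suf) (by omega)]
      have hpar1 : (i + 1) % 2 = 0 := by omega
      have he : pvAlt true (c :: t) = c :: pvAlt false t := by simp [pvAlt]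
      have ho : pvAlt false (c :: t) = pvAlt true t := by simp [pvAlt]
      simp only [if_pos hpar1, if_neg hpar, he, ho]
      refine Prod.ext ?_ (Prod.ext ?_ ?_) <;> simp [pvOne] <;> push_cast <;> omega

-- joining one-character strings with "" rebuilds the string
lemma pvJoin_singletons (xs : List Char) :
    PySem.Str.join "" (xs.map pvOne) = String.ofList xs := by
  have hflat : List.intercalate ([] : List Char) = List.flatten := by
    funext l
    induction l with
    | nil => simp [List.intercalate]
    | cons a t ih => cases t <;> simp_all [List.intercalate, List.intersperse]
  have hone : ∀ l : List Char, (l.map (String.toList ∘ pvOne)).flatten = l := by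
    intro l; induction l <;> simp_all [pvOne]
  simp [PySem.Str.join, PySem.Chars.join, hflat, hone]

-- the whole non-error branch, for one trimmed string s
lemma pvCore (s : String) :
    PySem.Str.join ""
      (((PySem.List.pyRange 0 (PySem.Str.len s) 1).foldl (rasshifrovkaStep s.toList)
        (List.replicate s.toList.length "", 0, (s.toList.length : Int) - 1)).1)
    = (PySem.Str.slice? s (some 0) none 2).getD "" ++
        (PySem.Str.slice? ((PySem.Str.slice? s (some 1) none 2).getD "") none none (-1)).getD "" := by
  have hB0 : PySem.Str.slice? s (some 0) none 2
      = some (String.ofList (pvAlt true s.toList)) := by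
    simp [PySem.Str.slice?, PySem.Chars.slice?_eq_listSlice?, pvSlice_even]
  have hB1 : PySem.Str.slice? s (some 1) none 2
      = some (String.ofList (pvAlt false s.toList)) := by
    simp [PySem.Str.slice?, PySem.Chars.slice?_eq_listSlice?, pvSlice_odd]
  have h1 : PySem.Str.len s = PySem.List.len s.toList := by
    simp [PySem.Str.len_eq, PySem.List.len]
  have h2 : (PySem.List.pyRange 0 (PySem.List.len s.toList) 1).foldl
      (rasshifrovkaStep s.toList)
      (List.replicate s.toList.length "", 0, (s.toList.length : Int) - 1)
      = (PySem.List.enumerate s.toList 0).foldl pvStep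
        (List.replicate s.toList.length "", 0, (s.toList.length : Int) - 1) := by
    rw [PySem.List.enumerate_eq_map_pyRange s.toList ' ', List.foldl_map]
    rfl
  have h3 := pvFill s.toList 0 [] [] (by omega)
  have hz : ((0 : Int) % 2 = 0) := by norm_num
  simp only [if_pos hz, List.nil_append, List.append_nil, List.length_nil,
    Nat.cast_zero, zero_add] at h3
  rw [h1, h2, h3, hB0, hB1]
  simp only [Option.getD_some]
  rw [PySem.Str.slice?_none_none_neg_one]
  simp only [Option.getD_some, String.toList_ofList]
  rw [← List.map_reverse, ← List.map_append, pvJoin_singletons]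
  simp

-- ===== VERDICT (by name: the statement is the Claim_ definition above) =====
theorem rasshifrovka_spec : Claim_equal_rasshifrovka := by
  intro shifr _
  unfold Spec_rasshifrovka rasshifrovka rasshifrovka_alt
  by_cases hc : shifr.toList.contains '#'
  · rw [if_neg (by simpa using hc), if_neg (by simpa using hc)]
    exact pvCore (PySem.Str.slice shifr none (some (-1)))
  · rw [if_pos (by simpa using hc), if_pos (by simpa using hc)]
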